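-- pv_equiv track=rewrite | github.com/Rushali-Sarkar/python | Tennis.py | count_scores
-- ===== SOURCE A (Python) =====
-- def count_scores ( points : str ) -> [ int ] :
--
--     PointsPlayerA = 0
--     PointsPlayerB = 0
--
--     index = 0
--
--     for player in points :
--         index = index + 1
--
--         if player == 'A':
--             PointsPlayerA += 1
--
--         if player == 'B':
--             PointsPlayerB += 1
--
--         if PointsPlayerA == 3 and PointsPlayerB == 3:
--              return deuce( points [ index : ] )
--
--         if PointsPlayerA == 4 :
--             return 1 , 0 , 0 , 0 , points [ index : ]
--
--         if PointsPlayerB == 4: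
--             return 0 , 1, 0 , 0 , points [ index : ]
--
--     return 0 , 0 , PointsPlayerA , PointsPlayerB , points [ index : ]
--
-- def deuce ( points : str ) :
--
--     if len ( points ) >= 2 :
--
--         if points [ 0 : 2 ] == "AA" :
--             return 1 , 0 , 0 , 0 , points [ 2 : ]
--
--         if points [ 0 : 2 ] == "BB" :
--             return 0 , 1 , 0 , 0 , points [ 2 : ]
--
--         if points [ 0 : 2 ] == "AB" or points [ 0 : 2 ] == "BA" :
--             return deuce ( points [ 2 : ] )
--
--     return 0 , 0 , 0 , 0 , points
-- ===== SOURCE B (Python) =====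
-- def count_scores(points):
--     a = 0
--     b = 0
--     stop = -1
--     for i, c in enumerate(points):
--         if c == 'A':
--             a += 1
--         elif c == 'B':
--             b += 1
--         if (a == 3 and b == 3) or a == 4 or b == 4:
--             stop = i + 1
--             break
--     if stop < 0:
--         return 0, 0, a, b, ''
--     rest = points[stop:]
--     if a == 4:
--         return 1, 0, 0, 0, rest
--     if b == 4:
--         return 0, 1, 0, 0, rest
--     # deuce: skip the maximal prefix of split pairs ('AB'/'BA'), then decide on the next pair
--     i = 0
--     n = len(rest)
--     while i + 1 < n and (rest[i], rest[i + 1]) in (('A', 'B'), ('B', 'A')):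
--         i += 2
--     nxt = rest[i:i + 2]
--     if nxt == 'AA':
--         return 1, 0, 0, 0, rest[i + 2:]
--     if nxt == 'BB':
--         return 0, 1, 0, 0, rest[i + 2:]
--     return 0, 0, 0, 0, rest[i:]
-- ===== Notes on version B (the rewrite author's own statement) =====
-- stated objective: alternative
-- what changed: The recursive deuce helper is replaced by an iterative skip of the maximal split-pair prefix followed by one look at the next pair, and the main loop no longer returns from inside: it only records the stop point, with all outcome decisions moved after the loop.
import Mathlib
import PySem

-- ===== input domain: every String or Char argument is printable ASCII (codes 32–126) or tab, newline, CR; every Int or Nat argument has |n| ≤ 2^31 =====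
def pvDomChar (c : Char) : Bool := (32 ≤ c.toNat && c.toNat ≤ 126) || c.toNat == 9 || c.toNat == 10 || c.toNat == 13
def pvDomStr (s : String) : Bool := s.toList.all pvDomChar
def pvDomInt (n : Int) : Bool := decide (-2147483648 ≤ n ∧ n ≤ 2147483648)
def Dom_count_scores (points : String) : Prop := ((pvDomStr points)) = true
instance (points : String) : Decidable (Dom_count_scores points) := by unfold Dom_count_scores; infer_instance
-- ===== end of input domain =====

-- B finds the stop point in one scan and decides the outcome after the loop, replacing A's
-- recursive `deuce` by a split-pair-prefix skip; objective: alternative decomposition, same cost.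


-- ===== PORT A =====
-- A's recursive `deuce`: compares points[0:2] with "AA"/"BB"/"AB"/"BA", recursing on the last two.
def pvDeuceA : List Char → Int × Int × Int × Int × String
  | c1 :: c2 :: rest =>
    if c1 = 'A' ∧ c2 = 'A' then (1, 0, 0, 0, String.ofList rest)
    else if c1 = 'B' ∧ c2 = 'B' then (0, 1, 0, 0, String.ofList rest)
    else if (c1 = 'A' ∧ c2 = 'B') ∨ (c1 = 'B' ∧ c2 = 'A') then pvDeuceA rest
    else (0, 0, 0, 0, String.ofList (c1 :: c2 :: rest))
  | cs => (0, 0, 0, 0, String.ofList cs)      -- len(points) < 2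

-- A's `for player in points` loop: counts both players and returns from inside the loop.
def pvLoopA : List Char → Int → Int → Int × Int × Int × Int × String
  | [], a, b => (0, 0, a, b, "")              -- index = len(points), so points[index:] = ""
  | c :: rest, a, b =>
    let a' := if c = 'A' then a + 1 else a
    let b' := if c = 'B' then b + 1 else b
    if a' = 3 ∧ b' = 3 then pvDeuceA rest
    else if a' = 4 then (1, 0, 0, 0, String.ofList rest)
    else if b' = 4 then (0, 1, 0, 0, String.ofList rest)
    else pvLoopA rest a' b'

def count_scores (points : String) : Int × Int × Int × Int × String :=
  pvLoopA points.toList 0 0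

-- ===== PORT B =====
-- B's enumerate loop: only locates the stop point (final counts + remaining suffix, none = fell through).
def pvFindStop : List Char → Int → Int → Int × Int × Option (List Char)
  | [], a, b => (a, b, none)                  -- stop stayed -1
  | c :: rest, a, b =>
    let a' := if c = 'A' then a + 1 else a
    let b' := if c ≠ 'A' ∧ c = 'B' then b + 1 else b      -- elif
    if (a' = 3 ∧ b' = 3) ∨ a' = 4 ∨ b' = 4 then (a', b', some rest)
    else pvFindStop rest a' b'

-- B's while loop: length of the maximal prefix made of ('A','B') / ('B','A') pairs.
def pvAltStop : List Char → Nat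
  | c1 :: c2 :: rest =>
    if (c1, c2) = ('A', 'B') ∨ (c1, c2) = ('B', 'A') then 2 + pvAltStop rest else 0
  | _ => 0

-- B after the while loop: nxt = rest[i:i+2], compared once.
def pvDeuceB (rest : List Char) : Int × Int × Int × Int × String :=
  let r := rest.drop (pvAltStop rest)
  if r.take 2 = ['A', 'A'] then (1, 0, 0, 0, String.ofList (r.drop 2))
  else if r.take 2 = ['B', 'B'] then (0, 1, 0, 0, String.ofList (r.drop 2))
  else (0, 0, 0, 0, String.ofList r)

-- B after the for loop: dispatch on the stop state.
def pvPostB : Int × Int × Option (List Char) → Int × Int × Int × Int × String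
  | (a, b, none) => (0, 0, a, b, "")
  | (a, b, some rest) =>
    if a = 4 then (1, 0, 0, 0, String.ofList rest)
    else if b = 4 then (0, 1, 0, 0, String.ofList rest)
    else pvDeuceB rest

def count_scores_alt (points : String) : Int × Int × Int × Int × String :=
  pvPostB (pvFindStop points.toList 0 0)

-- ===== PRECONDITION & SPEC =====
def Spec_count_scores (points : String) (out : Int × Int × Int × Int × String) : Prop := out = count_scores_alt points
instance (points : String) (out : Int × Int × Int × Int × String) : Decidable (Spec_count_scores points out) := by unfold Spec_count_scores; infer_instance

-- ===== CLAIM (what is proved, stated in full; the proofs are below) =====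
def Claim_equal_count_scores : Prop := ∀ (points : String), Dom_count_scores points → Spec_count_scores points (count_scores points)

-- ===== LEMMAS AND PROOFS =====

-- the two deuce phases agree on every suffix
theorem pvDeuceB_eq (cs : List Char) : pvDeuceB cs = pvDeuceA cs := by
  fun_induction pvDeuceA cs with
  | case1 c1 c2 rest h1 =>
    obtain ⟨rfl, rfl⟩ := h1
    simp [pvDeuceB, pvAltStop]
  | case2 c1 c2 rest h1 h2 =>
    obtain ⟨rfl, rfl⟩ := h2
    simp [pvDeuceB, pvAltStop]
  | case3 c1 c2 rest h1 h2 h3 ih =>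
    have hp : ((c1, c2) = ('A', 'B') ∨ (c1, c2) = ('B', 'A')) := by
      rcases h3 with ⟨rfl, rfl⟩ | ⟨rfl, rfl⟩ <;> simp
    rw [← ih]
    simp only [pvDeuceB, pvAltStop, if_pos hp]
    rw [Nat.add_comm]
    simp [List.drop_succ_cons]
  | case4 c1 c2 rest h1 h2 h3 =>
    have hp : ¬((c1, c2) = ('A', 'B') ∨ (c1, c2) = ('B', 'A')) := by
      simpa using h3
    simp only [pvDeuceB, pvAltStop, if_neg hp, List.drop_zero]
    have t1 : ¬ (c1 :: c2 :: rest).take 2 = ['A', 'A'] := by simpa using h1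
    have t2 : ¬ (c1 :: c2 :: rest).take 2 = ['B', 'B'] := by simpa using h2
    simp only [if_neg t1, if_neg t2]
  | case5 cs h =>
    match cs, h with
    | [], _ => simp [pvDeuceB, pvAltStop]
    | [c], _ => simp [pvDeuceB, pvAltStop]
    | c1 :: c2 :: rest, h => exact absurd rfl (h c1 c2 rest)

-- A's in-loop decisions equal B's stop-then-dispatch, from any count state
theorem pvLoop_eq (cs : List Char) : ∀ a b, pvLoopA cs a b = pvPostB (pvFindStop cs a b) := by
  induction cs with
  | nil => intro a b; simp [pvLoopA, pvFindStop, pvPostB]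
  | cons c rest ih =>
    intro a b
    have hb : (if c ≠ 'A' ∧ c = 'B' then b + 1 else b) = (if c = 'B' then b + 1 else b) := by
      by_cases h : c = 'B'
      · subst h; simp
      · simp [h]
    simp only [pvLoopA, pvFindStop, hb]
    set a' := if c = 'A' then a + 1 else a with ha'
    set b' := if c = 'B' then b + 1 else b with hb'
    by_cases h1 : a' = 3 ∧ b' = 3
    · have : (a' = 3 ∧ b' = 3) ∨ a' = 4 ∨ b' = 4 := Or.inl h1
      rw [if_pos h1, if_pos this]
      simp [pvPostB, h1.1, h1.2, pvDeuceB_eq]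
    · by_cases h2 : a' = 4
      · have : (a' = 3 ∧ b' = 3) ∨ a' = 4 ∨ b' = 4 := Or.inr (Or.inl h2)
        rw [if_neg h1, if_pos h2, if_pos this]
        simp [pvPostB, h2]
      · by_cases h3 : b' = 4
        · have : (a' = 3 ∧ b' = 3) ∨ a' = 4 ∨ b' = 4 := Or.inr (Or.inr h3)
          rw [if_neg h1, if_neg h2, if_pos h3, if_pos this]
          simp [pvPostB, h2, h3]
        · have : ¬((a' = 3 ∧ b' = 3) ∨ a' = 4 ∨ b' = 4) := by tauto
          rw [if_neg h1, if_neg h2, if_neg h3, if_neg this]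
          exact ih a' b'

-- ===== VERDICT (by name: the statement is the Claim_ definition above) =====
theorem count_scores_spec : Claim_equal_count_scores := by
  intro points _
  unfold Spec_count_scores count_scores count_scores_alt
  exact pvLoop_eq points.toList 0 0
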